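-- pv_equiv track=rewrite | github.com/Alina-Goova/Practicum | Games/мостики.py | prm2
-- ===== SOURCE A (Python) =====
-- t=['|', '-']
--
-- def prm2(x1, y1, w, a):
--     if x1<0 or x1>6 or y1<0 or y1>6 or a[x1][y1]!='['+t[x1%2]+']':
--         return False
--     if x1==6:
--         return True
--     if prm2(x1+1, y1+1, w, a):
--         return True
--     if prm2(x1+1, y1-1, w, a):
--         return True
--     if prm2(x1+2, y1, w, a):
--         return True
--     return False
-- ===== SOURCE B (Python) =====
-- # Bottom-up DP with two rolling rows instead of recursive DFS (return-value equivalent; no mutation).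
-- t = ['|', '-']
--
-- def prm2(x1, y1, w, a):
--     if x1 < 0 or x1 > 6 or y1 < 0 or y1 > 6:
--         return False
--     next1 = [False] * 7  # reachability-to-row-6 values for row x+1
--     next2 = [False] * 7  # for row x+2
--     for x in range(6, x1 - 1, -1):
--         cur = [a[x][y] == '[' + t[x % 2] + ']'
--                and (x == 6
--                     or (y < 6 and next1[y + 1])
--                     or (y > 0 and next1[y - 1])
--                     or next2[y])
--                for y in range(7)]
--         next1, next2 = cur, next1
--     return next1[y1]
-- ===== Notes on version B (the rewrite author's own statement) =====
-- stated objective: alternative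
-- what changed: Replaced A's recursive DFS (which can revisit cells exponentially) by a bottom-up dynamic program that sweeps rows 6..x1 once keeping two rolling 7-entry boolean rows and reads off the answer at (x1,y1).
-- outside the precondition, e.g. on prm2(0, 0, 0, [['x']]): A returns False, B raises IndexError
import Mathlib
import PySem

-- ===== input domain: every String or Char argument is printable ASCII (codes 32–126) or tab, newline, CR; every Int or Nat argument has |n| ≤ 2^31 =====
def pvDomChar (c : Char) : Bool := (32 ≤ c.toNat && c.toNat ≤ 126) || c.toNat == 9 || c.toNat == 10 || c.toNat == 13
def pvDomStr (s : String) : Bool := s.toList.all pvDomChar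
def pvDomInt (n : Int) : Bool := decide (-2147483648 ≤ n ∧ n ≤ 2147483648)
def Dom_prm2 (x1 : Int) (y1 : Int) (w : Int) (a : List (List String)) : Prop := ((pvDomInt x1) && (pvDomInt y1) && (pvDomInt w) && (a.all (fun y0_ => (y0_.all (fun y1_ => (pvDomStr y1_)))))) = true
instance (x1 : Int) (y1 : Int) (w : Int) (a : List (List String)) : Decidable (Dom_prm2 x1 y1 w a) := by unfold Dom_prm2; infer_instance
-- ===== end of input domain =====

-- B replaces A's recursive DFS by a bottom-up DP with two rolling 7-entry rows (alternative decomposition, same return values).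
-- Pre_ excludes in-range starting positions on grids smaller than 7x7, where A may raise IndexError (and B may too).


-- ===== PORT A =====
-- module-level t = ['|', '-']
def tlst : List String := ["|", "-"]

-- cell test a[x][y] == '[' + t[x % 2] + ']' (defaults only hit outside Pre_, where Python raises)
def cellOk (a : List (List String)) (x y : Int) : Bool :=
  PySem.List.pyGetD (PySem.List.pyGetD a x []) y ""
    == "[" ++ PySem.List.pyGetD tlst (PySem.Int.mod x 2) "" ++ "]"

def prm2 (x1 : Int) (y1 : Int) (w : Int) (a : List (List String)) : Bool :=
  if h : (decide (x1 < 0) || decide (x1 > 6) || decide (y1 < 0) || decide (y1 > 6)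
      || !(cellOk a x1 y1)) = true then false
  else if x1 == 6 then true
  else if prm2 (x1+1) (y1+1) w a then true
  else if prm2 (x1+1) (y1-1) w a then true
  else if prm2 (x1+2) y1 w a then true
  else false
termination_by (7 - x1).toNat
decreasing_by all_goals (simp at h; omega)

-- ===== PORT B =====
-- one DP row: cur = [cell(x,y) and (x==6 or (y<6 and next1[y+1]) or (y>0 and next1[y-1]) or next2[y]) for y in range(7)]
def bridgeRow (a : List (List String)) (x : Int) (next1 next2 : List Bool) : List Bool :=
  (PySem.List.pyRange 0 7 1).map (fun y =>
    cellOk a x y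
      && (x == 6
          || (decide (y < 6) && PySem.List.pyGetD next1 (y+1) false)
          || (decide (y > 0) && PySem.List.pyGetD next1 (y-1) false)
          || PySem.List.pyGetD next2 y false))

def prm2_alt (x1 : Int) (y1 : Int) (w : Int) (a : List (List String)) : Bool :=
  if decide (x1 < 0) || decide (x1 > 6) || decide (y1 < 0) || decide (y1 > 6) then false
  else
    let st := (PySem.List.pyRange 6 (x1 - 1) (-1)).foldl
      (fun (st : List Bool × List Bool) x => (bridgeRow a x st.1 st.2, st.1))
      (List.replicate 7 false, List.replicate 7 false)
    PySem.List.pyGetD st.1 y1 false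

-- ===== PRECONDITION & SPEC =====
-- Pre_ excludes in-range starting positions on grids smaller than 7x7 (fewer than 7 rows, or a short
-- row among the first 7): there A's recursive indexing may raise IndexError, and B's full-table DP
-- indexes every row 0..6 so it may raise as well; out-of-range starts never touch a and are kept.
def Pre_prm2 (x1 : Int) (y1 : Int) (w : Int) (a : List (List String)) : Prop :=
  (x1 < 0 ∨ 6 < x1 ∨ y1 < 0 ∨ 6 < y1) ∨ (7 ≤ a.length ∧ ∀ r ∈ a.take 7, 7 ≤ r.length)
instance (x1 : Int) (y1 : Int) (w : Int) (a : List (List String)) : Decidable (Pre_prm2 x1 y1 w a) := by unfold Pre_prm2; infer_instance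
def pvWitness_prm2 : Int × Int × Int × List (List String) := (-1, 0, 0, [])

def Spec_prm2 (x1 : Int) (y1 : Int) (w : Int) (a : List (List String)) (out : Bool) : Prop := out = prm2_alt x1 y1 w a
instance (x1 : Int) (y1 : Int) (w : Int) (a : List (List String)) (out : Bool) : Decidable (Spec_prm2 x1 y1 w a out) := by unfold Spec_prm2; infer_instance

-- ===== CLAIM (what is proved, stated in full; the proofs are below) =====
def Claim_equal_prm2 : Prop := ∀ (x1 : Int) (y1 : Int) (w : Int) (a : List (List String)), Dom_prm2 x1 y1 w a → Pre_prm2 x1 y1 w a → Spec_prm2 x1 y1 w a (prm2 x1 y1 w a)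

-- ===== LEMMAS AND PROOFS =====

-- A returns False on any out-of-range or high coordinate
theorem prm2_out (x y wv : Int) (a : List (List String)) (h : y < 0 ∨ 6 < y ∨ 6 < x) :
    prm2 x y wv a = false := by
  rw [prm2]
  rcases h with h | h | h <;> simp_all <;> omega

-- one unfolding of A in the in-range case
theorem prm2_unfold (x y wv : Int) (a : List (List String))
    (hx0 : 0 ≤ x) (hx : x ≤ 6) (hy0 : 0 ≤ y) (hy : y ≤ 6) :
    prm2 x y wv a
      = (cellOk a x y
          && (x == 6 || prm2 (x+1) (y+1) wv a || prm2 (x+1) (y-1) wv a || prm2 (x+2) y wv a)) := by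
  rw [prm2]
  by_cases hc : cellOk a x y
  · by_cases h6 : x = 6
    · simp [hc, h6]; omega
    · have : ¬ (x == 6) = true := by simp [h6]
      simp only [hc, h6]
      simp [show ¬ x < 0 by omega, show ¬ 6 < x by omega,
            show ¬ y < 0 by omega, show ¬ 6 < y by omega, this]
      by_cases h1 : prm2 (x+1) (y+1) wv a <;>
        by_cases h2 : prm2 (x+1) (y-1) wv a <;>
          by_cases h3 : prm2 (x+2) y wv a <;> simp [h1, h2, h3]
  · simp [hc]

-- the row of A-values at row x (proof-side helper)
def winrow (wv : Int) (a : List (List String)) (x : Int) : List Bool :=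
  (PySem.List.pyRange 0 7 1).map (fun y => prm2 x y wv a)

theorem winrow_high (wv : Int) (a : List (List String)) (x : Int) (h : 6 < x) :
    winrow wv a x = List.replicate 7 false := by
  simp [winrow, PySem.List.pyRange, prm2_out _ _ _ _ (Or.inr (Or.inr h))]

theorem bridgeRow_winrow (wv x : Int) (a : List (List String)) (hx0 : 0 ≤ x) (hx : x ≤ 6) :
    bridgeRow a x (winrow wv a (x+1)) (winrow wv a (x+2)) = winrow wv a x := by
  have hu : ∀ y : Int, 0 ≤ y → y ≤ 6 →
      (cellOk a x y
        && (x == 6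
            || (decide (y < 6) && PySem.List.pyGetD (winrow wv a (x+1)) (y+1) false)
            || (decide (y > 0) && PySem.List.pyGetD (winrow wv a (x+1)) (y-1) false)
            || PySem.List.pyGetD (winrow wv a (x+2)) y false))
        = prm2 x y wv a := by
    intro y hy0 hy6
    rw [prm2_unfold x y wv a hx0 hx hy0 hy6]
    have e1 : (decide (y < 6) && PySem.List.pyGetD (winrow wv a (x+1)) (y+1) false)
        = prm2 (x+1) (y+1) wv a := by
      by_cases h : y < 6
      · have := PySem.List.pyGetD_map_pyRange_of_nonneg
          (fun y => prm2 (x+1) y wv a) 7 (y+1) false (by omega) (by omega)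
        simp [winrow, h, this]
      · have hy : y = 6 := by omega
        simp [h, hy, prm2_out (x+1) 7 wv a (by omega)]
    have e2 : (decide (y > 0) && PySem.List.pyGetD (winrow wv a (x+1)) (y-1) false)
        = prm2 (x+1) (y-1) wv a := by
      by_cases h : 0 < y
      · have := PySem.List.pyGetD_map_pyRange_of_nonneg
          (fun y => prm2 (x+1) y wv a) 7 (y-1) false (by omega) (by omega)
        simp [winrow, h, this]
      · have hy : y = 0 := by omega
        simp [h, hy, prm2_out (x+1) (-1) wv a (by omega)]
    have e3 : PySem.List.pyGetD (winrow wv a (x+2)) y false = prm2 (x+2) y wv a := by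
      have := PySem.List.pyGetD_map_pyRange_of_nonneg
        (fun y => prm2 (x+2) y wv a) 7 y false (by omega) (by omega)
      simp [winrow, this]
    rw [e1, e2, e3]
  have hr : PySem.List.pyRange 0 7 1 = [0, 1, 2, 3, 4, 5, 6] := by decide
  simp only [winrow, hr, List.map_cons, List.map_nil] at hu
  simp only [bridgeRow, winrow, hr, List.map_cons, List.map_nil]
  rw [hu 0 (by norm_num) (by norm_num), hu 1 (by norm_num) (by norm_num),
      hu 2 (by norm_num) (by norm_num), hu 3 (by norm_num) (by norm_num),
      hu 4 (by norm_num) (by norm_num), hu 5 (by norm_num) (by norm_num),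
      hu 6 (by norm_num) (by norm_num)]

theorem fold_inv (wv : Int) (a : List (List String)) :
    ∀ n : Nat, n ≤ 7 →
      (PySem.List.pyRange 6 (7 - (n : Int) - 1) (-1)).foldl
          (fun (st : List Bool × List Bool) x => (bridgeRow a x st.1 st.2, st.1))
          (List.replicate 7 false, List.replicate 7 false)
        = (winrow wv a (7 - n), winrow wv a (8 - n)) := by
  intro n
  induction n with
  | zero =>
    intro _
    rw [PySem.List.pyRange_neg_one_eq_nil (by norm_num)]
    simp [winrow_high wv a 7 (by norm_num), winrow_high wv a 8 (by norm_num)]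
  | succ m ih =>
    intro hm
    have hk : (7 : Int) - (m + 1 : Nat) = 6 - m := by push_cast; ring
    have hsplit : PySem.List.pyRange 6 (7 - ((m+1 : Nat) : Int) - 1) (-1)
        = PySem.List.pyRange 6 (7 - (m : Int) - 1) (-1) ++ [6 - (m : Int)] := by
      rw [PySem.List.pyRange_neg_one_eq_reverse, PySem.List.pyRange_neg_one_eq_reverse]
      rw [show (7 : Int) - ((m+1 : Nat) : Int) - 1 + 1 = 6 - (m : Int) by push_cast; ring,
          show (7 : Int) - (m : Int) - 1 + 1 = 6 - (m : Int) + 1 by ring]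
      rw [PySem.List.pyRange_one_cons (by omega)]
      simp
    rw [hsplit, List.foldl_append, ih (by omega)]
    simp only [List.foldl_cons, List.foldl_nil]
    have h1 : (6 : Int) - m + 1 = 7 - m := by ring
    have h2 : (6 : Int) - m + 2 = 8 - m := by ring
    rw [show (7 : Int) - (m : Int) = 6 - (m : Int) + 1 by ring,
        show (8 : Int) - (m : Int) = 6 - (m : Int) + 2 by ring]
    rw [bridgeRow_winrow wv (6 - (m : Int)) a (by omega) (by omega)]
    rw [show (7 : Int) - ((m + 1 : Nat) : Int) = 6 - (m : Int) by push_cast; ring,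
        show (8 : Int) - ((m + 1 : Nat) : Int) = 6 - (m : Int) + 1 by push_cast; ring]

-- ===== VERDICT (by name: the statement is the Claim_ definition above) =====
theorem prm2_spec : Claim_equal_prm2 := by
  intro x1 y1 w a _ _
  unfold Spec_prm2 prm2_alt
  by_cases hout : x1 < 0 ∨ 6 < x1 ∨ y1 < 0 ∨ 6 < y1
  · have hA : prm2 x1 y1 w a = false := by
      rcases hout with h | h | h | h
      · rw [prm2]; simp [h]
      · rw [prm2]; simp [h]
      · exact prm2_out _ _ _ _ (Or.inl h)
      · exact prm2_out _ _ _ _ (Or.inr (Or.inl h))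
    have : (decide (x1 < 0) || decide (x1 > 6) || decide (y1 < 0) || decide (y1 > 6)) = true := by
      simp; omega
    simp [this, hA]
  · push_neg at hout
    obtain ⟨hx0, hx6, hy0, hy6⟩ := hout
    have hcond : (decide (x1 < 0) || decide (x1 > 6) || decide (y1 < 0) || decide (y1 > 6)) = false := by
      simp; omega
    rw [hcond]
    simp only [Bool.false_eq_true, if_false]
    have hn : ((7 - x1).toNat : Int) = 7 - x1 := by omega
    have := fold_inv w a (7 - x1).toNat (by omega)
    rw [hn] at this
    rw [show (7 : Int) - (7 - x1) - 1 = x1 - 1 by ring,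
        show (7 : Int) - (7 - x1) = x1 by ring,
        show (8 : Int) - (7 - x1) = x1 + 1 by ring] at this
    rw [this]
    simp only [winrow]
    rw [PySem.List.pyGetD_map_pyRange_of_nonneg
      (fun y => prm2 x1 y w a) 7 y1 false (by omega) (by omega)]
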